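-- pv_equiv track=rewrite | github.com/cnvxlns/bojcodes | 프로그래머스/0/181921. 배열 만들기 2/배열 만들기 2.py | solution
-- ===== SOURCE A (Python) =====
-- def solution(l, r):
--     answer = []
--     for i in range(l, r + 1):
--         flag = 0
--         for j in str(i):
--             if j != '0' and j != '5':
--                 flag = 1
--                 break
--         if not flag:
--             answer.append(i)
--
--     if len(answer) == 0:
--         answer.append(-1)
--
--     return answer
-- ===== SOURCE B (Python) =====
-- def solution(l, r):
--     # Generate all numbers made of digits {0,5} up to r's digit count (in
--     # increasing order), then filter to [l, r] -- instead of scanning the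
--     # whole range.
--     cands = [0]
--     level = [5]
--     for _ in str(max(r, 0)):
--         cands += level
--         level = [10 * x + d for x in level for d in (0, 5)]
--     ans = [x for x in cands if l <= x <= r]
--     return ans if ans else [-1]
-- ===== Notes on version B (the rewrite author's own statement) =====
-- stated objective: faster
-- what changed: Instead of scanning every integer in [l,r] and testing its decimal string, B generates all numbers whose digits are in {0,5} level by level (one level per digit of r) in increasing order and filters them to [l,r].
import Mathlib
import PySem

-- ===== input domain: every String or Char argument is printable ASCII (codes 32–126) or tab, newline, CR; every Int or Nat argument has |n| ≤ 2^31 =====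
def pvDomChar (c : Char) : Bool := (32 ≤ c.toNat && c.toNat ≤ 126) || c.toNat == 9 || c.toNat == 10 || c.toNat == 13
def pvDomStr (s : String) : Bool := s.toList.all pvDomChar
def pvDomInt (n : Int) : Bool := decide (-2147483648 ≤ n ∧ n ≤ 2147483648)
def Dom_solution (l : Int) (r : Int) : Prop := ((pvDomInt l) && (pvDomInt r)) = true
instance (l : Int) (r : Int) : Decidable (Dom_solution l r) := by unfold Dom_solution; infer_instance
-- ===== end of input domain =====

-- B generates the numbers with digits in {0,5} level by level (one level per digit of r)
-- and filters them to [l, r] instead of scanning the whole range: an asymptotically faster algorithm.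


-- ===== PORT A =====
-- inner 'for j in str(i): if j != '0' and j != '5': flag = 1; break' (break = stop with flag 1)
def innerFlag : List Char → Int
  | [] => 0
  | j :: rest => if j ≠ '0' ∧ j ≠ '5' then 1 else innerFlag rest

def solution (l : Int) (r : Int) : List Int :=
  let answer := (PySem.List.pyRange l (r + 1) 1).foldl
    (fun acc i => if innerFlag (PySem.Int.toChars i) == 0 then acc ++ [i] else acc) []
  if PySem.List.len answer == 0 then answer ++ [-1] else answer

-- ===== PORT B =====
-- one iteration of B's for-loop body: cands += level; level = [10*x+d for x in level for d in (0,5)]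
def bStep (s : List Int × List Int) (_ : Char) : List Int × List Int :=
  (s.1 ++ s.2, s.2.flatMap (fun x => [10 * x, 10 * x + 5]))

def solution_alt (l : Int) (r : Int) : List Int :=
  let s := (PySem.Int.toChars (max r 0)).foldl bStep ([0], [5])
  let ans := s.1.filter (fun x => decide (l ≤ x) && decide (x ≤ r))
  if ans = [] then [-1] else ans

-- ===== PRECONDITION & SPEC =====
def Spec_solution (l : Int) (r : Int) (out : List Int) : Prop := out = solution_alt l r
instance (l : Int) (r : Int) (out : List Int) : Decidable (Spec_solution l r out) := by unfold Spec_solution; infer_instance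

-- ===== CLAIM (what is proved, stated in full; the proofs are below) =====
def Claim_equal_solution : Prop := ∀ (l : Int) (r : Int), Dom_solution l r → Spec_solution l r (solution l r)

-- ===== LEMMAS AND PROOFS =====

-- decimal digit characters of n, most significant first (= Nat.toDigits 10 n)
def digitsChars (n : Nat) : List Char :=
  if h : n / 10 = 0 then [Nat.digitChar (n % 10)]
  else digitsChars (n / 10) ++ [Nat.digitChar (n % 10)]
decreasing_by exact Nat.div_lt_self (by omega) (by omega)

-- all decimal digits of n are 0 or 5
def good (n : Nat) : Bool :=
  (decide (n % 10 = 0) || decide (n % 10 = 5)) &&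
    (if h : n / 10 = 0 then true else good (n / 10))
decreasing_by exact Nat.div_lt_self (by omega) (by omega)

lemma toDigitsCore_eq (f : Nat) : ∀ (n : Nat) (acc : List Char), n < f →
    Nat.toDigitsCore 10 f n acc = digitsChars n ++ acc := by
  induction f with
  | zero => intro n acc h; omega
  | succ f ih =>
    intro n acc h
    by_cases h0 : n / 10 = 0
    · rw [digitsChars, dif_pos h0]
      simp only [Nat.toDigitsCore, h0, if_pos]
      simp
    · rw [digitsChars, dif_neg h0]
      simp only [Nat.toDigitsCore, h0, if_neg, if_false]
      rw [ih (n / 10) _ (by omega)]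
      simp

lemma toChars_nonneg (i : Int) (h : 0 ≤ i) :
    PySem.Int.toChars i = digitsChars i.toNat := by
  unfold PySem.Int.toChars
  rw [if_neg (by omega), Nat.toDigits, toDigitsCore_eq _ _ _ (by omega)]
  simp

lemma innerFlag_eq_zero (cs : List Char) :
    innerFlag cs = 0 ↔ ∀ c ∈ cs, c = '0' ∨ c = '5' := by
  induction cs with
  | nil => simp [innerFlag]
  | cons j rest ih =>
    simp only [innerFlag]
    split_ifs with hj
    · constructor
      · intro h; exact absurd h (by norm_num)
      · intro h; exact absurd (h j (by simp)) (by tauto)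
    · rw [ih]
      constructor
      · intro h c hc
        rcases List.mem_cons.mp hc with rfl | hc
        · tauto
        · exact h c hc
      · intro h c hc
        exact h c (List.mem_cons_of_mem _ hc)

lemma digitChar05 (m : Nat) (hm : m < 10) :
    (Nat.digitChar m = '0' ∨ Nat.digitChar m = '5') ↔ (m = 0 ∨ m = 5) := by
  interval_cases m <;> simp [Nat.digitChar]

lemma digitsChars_all (n : Nat) :
    (∀ c ∈ digitsChars n, c = '0' ∨ c = '5') ↔ good n = true := by
  induction n using digitsChars.induct with
  | case1 n h0 =>
    rw [digitsChars, dif_pos h0, good, dif_pos h0]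
    simp only [List.mem_singleton, forall_eq, Bool.and_true, Bool.or_eq_true,
      decide_eq_true_eq]
    exact digitChar05 (n % 10) (by omega)
  | case2 n h0 ih =>
    rw [digitsChars, dif_neg h0, good, dif_neg h0]
    simp only [List.mem_append, List.mem_singleton, Bool.and_eq_true]
    constructor
    · intro h
      refine ⟨?_, ih.mp (fun c hc => h c (Or.inl hc))⟩
      simpa [digitChar05 (n % 10) (by omega)] using h _ (Or.inr rfl)
    · rintro ⟨h1, h2⟩ c hc
      rcases hc with hc | rfl
      · exact ih.mpr h2 c hc
      · rw [digitChar05 (n % 10) (by omega)]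
        simpa using h1

lemma digitsChars_lt (n : Nat) : n < 10 ^ (digitsChars n).length := by
  induction n using digitsChars.induct with
  | case1 n h0 => rw [digitsChars, dif_pos h0]; simp only [List.length_singleton]; omega
  | case2 n h0 ih =>
    rw [digitsChars, dif_neg h0]
    simp only [List.length_append, List.length_singleton]
    rw [pow_succ]
    have h1 : n % 10 < 10 := by omega
    have h2 : n = 10 * (n / 10) + n % 10 := by omega
    omega

lemma flag_iff (i : Int) :
    innerFlag (PySem.Int.toChars i) = 0 ↔ 0 ≤ i ∧ good i.toNat = true := by
  by_cases h : 0 ≤ i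
  · rw [toChars_nonneg i h, innerFlag_eq_zero, digitsChars_all]
    simp [h]
  · unfold PySem.Int.toChars
    rw [if_pos (by omega)]
    have h1 : innerFlag ('-' :: Nat.toDigits 10 i.natAbs) = 1 := by
      simp only [innerFlag]
      split_ifs with hs
      · rfl
      · exact absurd ⟨by decide, by decide⟩ hs
    rw [h1]
    constructor
    · intro hc; exact absurd hc (by norm_num)
    · rintro ⟨h0, -⟩; exact absurd h0 h

def nextLevel (lv : List Int) : List Int := lv.flatMap (fun x => [10 * x, 10 * x + 5])

def levelList : Nat → List Int
  | 0 => [5]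
  | k + 1 => nextLevel (levelList k)

def levelsCat : Nat → List Int → List Int
  | 0, _ => []
  | k + 1, lv => lv ++ levelsCat k (nextLevel lv)

def nextIter : Nat → List Int → List Int
  | 0, lv => lv
  | k + 1, lv => nextIter k (nextLevel lv)

lemma fold_bStep (cs : List Char) : ∀ (c0 lv : List Int),
    cs.foldl bStep (c0, lv) = (c0 ++ levelsCat cs.length lv, nextIter cs.length lv) := by
  induction cs with
  | nil => intro c0 lv; simp [levelsCat, nextIter]
  | cons c cs ih =>
    intro c0 lv
    rw [List.foldl_cons, show bStep (c0, lv) c = (c0 ++ lv, nextLevel lv) from rfl, ih]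
    simp [levelsCat, nextIter, List.append_assoc]

lemma mem_levelsCat (k : Nat) : ∀ (j : Nat) (x : Int),
    x ∈ levelsCat k (levelList j) ↔ ∃ m, j ≤ m ∧ m < j + k ∧ x ∈ levelList m := by
  induction k with
  | zero => intro j x; simp [levelsCat]; omega
  | succ k ih =>
    intro j x
    show x ∈ levelList j ++ levelsCat k (levelList (j + 1)) ↔ _
    rw [List.mem_append, ih (j + 1) x]
    constructor
    · rintro (h | ⟨m, h1, h2, h3⟩)
      · exact ⟨j, le_refl j, by omega, h⟩
      · exact ⟨m, by omega, by omega, h3⟩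
    · rintro ⟨m, h1, h2, h3⟩
      rcases Nat.eq_or_lt_of_le h1 with rfl | hlt
      · exact Or.inl h3
      · exact Or.inr ⟨m, by omega, by omega, h3⟩

lemma good_zero : good 0 = true := by rw [good]; simp

lemma good_ten (n d : Nat) (hn : 0 < n) (hd : d = 0 ∨ d = 5) :
    good (10 * n + d) = good n := by
  rw [good]
  have h1 : (10 * n + d) % 10 = d := by omega
  have h2 : (10 * n + d) / 10 = n := by omega
  rw [h1, h2, dif_neg (by omega)]
  rcases hd with rfl | rfl <;> simp

lemma good_split (n : Nat) (h : 10 ≤ n) (hg : good n = true) :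
    (n % 10 = 0 ∨ n % 10 = 5) ∧ good (n / 10) = true := by
  rw [good, dif_neg (by omega)] at hg
  simpa using hg

lemma mem_levelList (k : Nat) (x : Int) :
    x ∈ levelList k ↔ good x.toNat = true ∧ 5 * 10 ^ k ≤ x ∧ x < 10 ^ (k + 1) := by
  induction k generalizing x with
  | zero =>
    simp only [levelList, List.mem_singleton, pow_zero, mul_one, pow_one]
    constructor
    · rintro rfl
      refine ⟨?_, by norm_num, by norm_num⟩
      show good 5 = true
      rw [good, dif_pos (by norm_num)]
      decide
    · rintro ⟨hg, h5, h10⟩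
      rw [good, dif_pos (by omega)] at hg
      simp at hg
      omega
  | succ k ih =>
    obtain ⟨A, hA, hApos, e1, e2⟩ :
        ∃ A : Int, 10 ^ k = A ∧ 0 < A ∧ 10 ^ (k + 1) = A * 10 ∧ 10 ^ (k + 1 + 1) = A * 10 * 10 :=
      ⟨10 ^ k, rfl, by positivity, by ring, by ring⟩
    show x ∈ nextLevel (levelList k) ↔ _
    rw [nextLevel, List.mem_flatMap, e1, e2]
    constructor
    · rintro ⟨y, hy, hx⟩
      rw [ih, hA] at hy
      obtain ⟨hg, h1, h2⟩ := hy
      have hy0 : (0:Int) ≤ y := by omega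
      obtain ⟨n, hn⟩ : ∃ n : Nat, (n : Int) = y := ⟨y.toNat, Int.toNat_of_nonneg hy0⟩
      have hn0 : 0 < n := by omega
      have hgn : good n = true := by rwa [show y.toNat = n by omega] at hg
      simp only [List.mem_cons, List.not_mem_nil, or_false] at hx
      rcases hx with rfl | rfl
      · refine ⟨?_, by omega, by omega⟩
        rw [show (10 * y).toNat = 10 * n + 0 by omega, good_ten n 0 hn0 (Or.inl rfl)]
        exact hgn
      · refine ⟨?_, by omega, by omega⟩
        rw [show (10 * y + 5).toNat = 10 * n + 5 by omega, good_ten n 5 hn0 (Or.inr rfl)]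
        exact hgn
    · rintro ⟨hg, h1, h2⟩
      have hx0 : (0:Int) ≤ x := by omega
      obtain ⟨n, hn⟩ : ∃ n : Nat, (n : Int) = x := ⟨x.toNat, Int.toNat_of_nonneg hx0⟩
      have h50 : 50 ≤ n := by omega
      have hgn : good n = true := by rwa [show x.toNat = n by omega] at hg
      obtain ⟨hd, hq⟩ := good_split n (by omega) hgn
      refine ⟨((n / 10 : Nat) : Int), ?_, ?_⟩
      · rw [ih, hA]
        refine ⟨by simpa using hq, by omega, by omega⟩
      · simp only [List.mem_cons, List.not_mem_nil, or_false]
        rcases hd with hd | hd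
        · left; omega
        · right; omega

lemma good_five_le (n : Nat) (h1 : 1 ≤ n) (hg : good n = true) : 5 ≤ n := by
  by_cases h : n < 10
  · rw [good, dif_pos (by omega)] at hg
    simp at hg
    omega
  · omega

lemma exists_level (n : Nat) : ∀ (h1 : 1 ≤ n) (hg : good n = true),
    ∃ m, 5 * 10 ^ m ≤ n ∧ n < 10 ^ (m + 1) := by
  induction n using Nat.strong_induction_on with
  | _ n ih =>
    intro h1 hg
    by_cases h : n < 10
    · have h5 := good_five_le n h1 hg
      rw [good, dif_pos (by omega)] at hg
      simp at hg
      have hn5 : n = 5 := by omega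
      subst hn5
      exact ⟨0, by norm_num, by norm_num⟩
    · obtain ⟨hd, hq⟩ := good_split n (by omega) hg
      obtain ⟨m, hm1, hm2⟩ := ih (n / 10) (by omega) (by omega) hq
      refine ⟨m + 1, ?_, ?_⟩
      · have : 5 * 10 ^ (m + 1) = 10 * (5 * 10 ^ m) := by ring
        omega
      · have : 10 ^ (m + 1 + 1) = 10 * 10 ^ (m + 1) := by ring
        omega

lemma pairwise_levelList (k : Nat) : (levelList k).Pairwise (· < ·) := by
  induction k with
  | zero => simp [levelList]
  | succ k ih =>
    show (nextLevel (levelList k)).Pairwise (· < ·)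
    rw [nextLevel, List.pairwise_flatMap]
    constructor
    · intro a _; exact List.pairwise_pair.mpr (by omega)
    · exact ih.imp (by intro a b hab x hx y hy; simp at hx hy; omega)

lemma pairwise_levelsCat (k : Nat) : ∀ (j : Nat), (levelsCat k (levelList j)).Pairwise (· < ·) := by
  induction k with
  | zero => intro j; simp [levelsCat]
  | succ k ih =>
    intro j
    show (levelList j ++ levelsCat k (levelList (j + 1))).Pairwise (· < ·)
    rw [List.pairwise_append]
    refine ⟨pairwise_levelList j, ih (j + 1), ?_⟩
    intro x hx y hy
    rw [mem_levelList] at hx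
    rw [mem_levelsCat] at hy
    obtain ⟨m, hm1, _, hy⟩ := hy
    rw [mem_levelList] at hy
    have h1 : (10:Int) ^ (j + 1) ≤ 10 ^ m := by
      apply pow_le_pow_right₀ <;> omega
    have h2 : (0:Int) < 10 ^ m := by positivity
    calc x < 10 ^ (j + 1) := hx.2.2
      _ ≤ 10 ^ m := h1
      _ ≤ 5 * 10 ^ m := by omega
      _ ≤ y := hy.2.1

-- the candidate list B builds, characterised
lemma mem_cands (r x : Int) :
    x ∈ ((PySem.Int.toChars (max r 0)).foldl bStep ([0], [5])).1 ↔
      x = 0 ∨ ∃ m, m < (PySem.Int.toChars (max r 0)).length ∧ x ∈ levelList m := by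
  rw [fold_bStep]
  show x ∈ 0 :: levelsCat _ (levelList 0) ↔ _
  rw [List.mem_cons, mem_levelsCat]
  constructor
  · rintro (rfl | ⟨m, _, hm2, hm3⟩)
    · exact Or.inl rfl
    · exact Or.inr ⟨m, by omega, hm3⟩
  · rintro (rfl | ⟨m, hm1, hm2⟩)
    · exact Or.inl rfl
    · exact Or.inr ⟨m, by omega, by omega, hm2⟩

lemma pairwise_cands (r : Int) :
    (((PySem.Int.toChars (max r 0)).foldl bStep ([0], [5])).1).Pairwise (· < ·) := by
  rw [fold_bStep]
  show (0 :: levelsCat _ (levelList 0)).Pairwise (· < ·)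
  rw [List.pairwise_cons]
  refine ⟨?_, pairwise_levelsCat _ 0⟩
  intro y hy
  rw [mem_levelsCat] at hy
  obtain ⟨m, _, _, hy⟩ := hy
  rw [mem_levelList] at hy
  have : (0:Int) < 10 ^ m := by positivity
  omega

-- membership bound: a good x with 5 ≤ x ≤ r fits within r's digit count
lemma level_lt_digits (r x : Int) (hx5 : 5 ≤ x) (hxr : x ≤ r)
    (hg : good x.toNat = true) :
    ∃ m, m < (PySem.Int.toChars (max r 0)).length ∧ x ∈ levelList m := by
  have hr5 : 5 ≤ r := le_trans hx5 hxr
  rw [max_eq_left (by omega), toChars_nonneg r (by omega)]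
  obtain ⟨m, hm1, hm2⟩ := exists_level x.toNat (by omega) hg
  have hrd := digitsChars_lt r.toNat
  refine ⟨m, ?_, ?_⟩
  · have h1 : 10 ^ m ≤ x.toNat := by
      have : 10 ^ m ≤ 5 * 10 ^ m := by omega
      omega
    have h2 : 10 ^ m < 10 ^ (digitsChars r.toNat).length := by omega
    exact (Nat.pow_lt_pow_iff_right (by omega)).mp h2
  · rw [mem_levelList]
    refine ⟨hg, ?_, ?_⟩
    · have := Int.toNat_of_nonneg (show (0:Int) ≤ x by omega)
      calc (5:Int) * 10 ^ m = ((5 * 10 ^ m : Nat) : Int) := by push_cast; ring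
        _ ≤ (x.toNat : Int) := by exact_mod_cast hm1
        _ = x := this
    · have := Int.toNat_of_nonneg (show (0:Int) ≤ x by omega)
      calc x = (x.toNat : Int) := this.symm
        _ < ((10 ^ (m + 1) : Nat) : Int) := by exact_mod_cast hm2
        _ = 10 ^ (m + 1) := by push_cast; ring

-- the two filtered cores agree
lemma cores_eq (l r : Int) :
    (PySem.List.pyRange l (r + 1) 1).foldl
      (fun acc i => if innerFlag (PySem.Int.toChars i) == 0 then acc ++ [i] else acc) []
    = (((PySem.Int.toChars (max r 0)).foldl bStep ([0], [5])).1.filter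
        (fun x => decide (l ≤ x) && decide (x ≤ r))) := by
  have hA := PySem.List.foldl_append_if
    (fun i => innerFlag (PySem.Int.toChars i) == 0) id (PySem.List.pyRange l (r + 1) 1) []
  simp only [List.map_id, List.nil_append, id_eq] at hA
  rw [hA]
  have pwA : ((PySem.List.pyRange l (r + 1) 1).filter
      (fun i => innerFlag (PySem.Int.toChars i) == 0)).Pairwise (· < ·) :=
    (PySem.List.pairwise_lt_pyRange_one l (r + 1)).filter _
  have pwB := (pairwise_cands r).filter (fun x => decide (l ≤ x) && decide (x ≤ r))
  apply List.eq_of_perm_of_sorted (fun a b _ _ h1 h2 => (lt_asymm h1 h2).elim) pwA pwB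
  rw [List.perm_ext_iff_of_nodup (pwA.imp ne_of_lt) (pwB.imp ne_of_lt)]
  intro x
  rw [List.mem_filter, List.mem_filter, PySem.List.mem_pyRange_one, mem_cands]
  simp only [beq_iff_eq, Bool.and_eq_true, decide_eq_true_eq]
  rw [flag_iff]
  constructor
  · rintro ⟨⟨hl, hr⟩, hx0, hg⟩
    refine ⟨?_, hl, by omega⟩
    by_cases h0 : x = 0
    · exact Or.inl h0
    · refine Or.inr (level_lt_digits r x ?_ (by omega) hg)
      have : 1 ≤ x.toNat := by omega
      have := good_five_le x.toNat this hg
      omega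
  · rintro ⟨hx, hl, hr⟩
    refine ⟨⟨hl, by omega⟩, ?_⟩
    rcases hx with rfl | ⟨m, _, hm⟩
    · exact ⟨le_refl 0, good_zero⟩
    · rw [mem_levelList] at hm
      have : (0:Int) < 10 ^ m := by positivity
      exact ⟨by omega, hm.1⟩

-- the final empty-answer fallback, shared shape of both programs
lemma finalize (C : List Int) :
    (if PySem.List.len C == 0 then C ++ [-1] else C) = (if C = [] then [-1] else C) := by
  cases C with
  | nil => simp [PySem.List.len]
  | cons a t =>
    rw [if_neg (by simp; omega), if_neg (by simp)]

-- ===== VERDICT (by name: the statement is the Claim_ definition above) =====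
theorem solution_spec : Claim_equal_solution := by
  intro l r _
  unfold Spec_solution solution solution_alt
  rw [cores_eq l r]
  exact finalize _
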